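-- pv_equiv track=rewrite | github.com/Mahdjouu/Message_de_bienvenue | message_de_bienvenue.py | traitement_plusieurs_noms
-- ===== SOURCE A (Python) =====
-- def traitement_plusieurs_noms(noms):
--     nom = ""
--     noms_traites = ""
--     j = 0
--     for i in range(0, len(noms)):
--         if noms[i] == ",":
--             nom = noms[j:i]
--             if nom != nom.upper():
--                 nom = nom[0].upper() + nom[1:]
--                 noms_traites += nom + ", "
--             j = i + 1
--     nom = noms[j:]
--     if nom != nom.upper():
--         nom = nom[0].upper() + nom[1:]
--         noms_traites += nom
--     if len(noms_traites) > 0 and noms_traites[-2] == ',':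
--         noms_traites = noms_traites[0:-2]
--     return noms_traites
-- ===== SOURCE B (Python) =====
-- def traitement_plusieurs_noms(noms):
--     return ", ".join(n[0].upper() + n[1:] for n in noms.split(",") if n != n.upper())
-- ===== Notes on version B (the rewrite author's own statement) =====
-- stated objective: simpler
-- what changed: Replaces the manual index scan with start-pointer, in-loop accumulation, separate final-segment handling and trailing-separator trim by a single split/filter/capitalize/join over the comma-separated tokens (C-level str.split and str.join instead of a per-character Python loop).
import Mathlib
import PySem

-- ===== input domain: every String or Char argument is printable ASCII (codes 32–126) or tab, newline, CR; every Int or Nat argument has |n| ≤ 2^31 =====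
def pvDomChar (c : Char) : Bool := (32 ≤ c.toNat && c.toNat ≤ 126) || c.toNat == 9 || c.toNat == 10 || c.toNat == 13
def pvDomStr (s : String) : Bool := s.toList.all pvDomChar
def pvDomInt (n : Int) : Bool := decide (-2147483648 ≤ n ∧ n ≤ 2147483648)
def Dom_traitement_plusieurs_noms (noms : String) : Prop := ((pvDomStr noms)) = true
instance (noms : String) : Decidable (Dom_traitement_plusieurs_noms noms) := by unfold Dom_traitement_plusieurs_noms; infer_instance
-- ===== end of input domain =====

-- B replaces A's manual index scan (start pointer, in-loop accumulation, separate final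
-- segment, trailing-", " trim) by one split / filter / capitalize / join over the tokens.

-- ===== PORT A =====
def traitement_plusieurs_noms (noms : String) : String :=
  let noms := noms.toList
  -- for i in range(0, len(noms)): … ;  state = (noms_traites, j)
  let st := (PySem.List.pyRange 0 (PySem.Chars.len noms) 1).foldl
    (fun (st : List Char × Int) (i : Int) =>
      if PySem.List.pyGetD noms i ' ' = ',' then
        let nom := PySem.List.slice noms (some st.2) (some i)
        if nom ≠ PySem.Chars.upper nom then
          (st.1 ++ ((PySem.Chars.upperChar (PySem.List.pyGetD nom 0 ' ') ::
              PySem.List.slice nom (some 1) none) ++ [',', ' ']), i + 1)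
        else
          (st.1, i + 1)
      else st)
    (([] : List Char), (0 : Int))
  let nom := PySem.List.slice noms (some st.2) none
  let noms_traites :=
    if nom ≠ PySem.Chars.upper nom then
      st.1 ++ (PySem.Chars.upperChar (PySem.List.pyGetD nom 0 ' ') ::
        PySem.List.slice nom (some 1) none)
    else st.1
  -- if len(noms_traites) > 0 and noms_traites[-2] == ',': trim  (Python raises when
  -- noms_traites has length 1; the port leaves the string unchanged there — outside Pre_)
  let noms_traites :=
    if 0 < noms_traites.length ∧ PySem.List.pyGet? noms_traites (-2) = some ',' then
      PySem.List.slice noms_traites (some 0) (some (-2))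
    else noms_traites
  String.ofList noms_traites

-- ===== PORT B =====
def traitement_plusieurs_noms_alt (noms : String) : String :=
  String.ofList (PySem.Chars.join [',', ' ']
    (((PySem.Chars.splitOn noms.toList [',']).filter
        (fun n => n != PySem.Chars.upper n)).map
      (fun n => PySem.Chars.upperChar (PySem.List.pyGetD n 0 ' ') ::
        PySem.List.slice n (some 1) none)))

-- ===== PRECONDITION & SPEC =====
-- Pre_ excludes exactly the inputs on which the Python A raises IndexError: those whose
-- last comma-separated token is the only kept one (≠ its uppercase) and has length 1,
-- so that the accumulated result has length 1 when A evaluates noms_traites[-2].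
def Pre_traitement_plusieurs_noms (noms : String) : Prop :=
  ¬ ((PySem.Chars.splitOn noms.toList [',']).dropLast.all
        (fun q => q == PySem.Chars.upper q) = true ∧
     ((PySem.Chars.splitOn noms.toList [',']).getLastD []).length = 1 ∧
     (PySem.Chars.splitOn noms.toList [',']).getLastD [] ≠
        PySem.Chars.upper ((PySem.Chars.splitOn noms.toList [',']).getLastD []))
instance (noms : String) : Decidable (Pre_traitement_plusieurs_noms noms) := by
  unfold Pre_traitement_plusieurs_noms; infer_instance

def pvWitness_traitement_plusieurs_noms : String := "alice,BOB,carol"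

def Spec_traitement_plusieurs_noms (noms : String) (out : String) : Prop :=
  out = traitement_plusieurs_noms_alt noms
instance (noms : String) (out : String) : Decidable (Spec_traitement_plusieurs_noms noms out) := by
  unfold Spec_traitement_plusieurs_noms; infer_instance

-- ===== CLAIM (what is proved, stated in full; the proofs are below) =====
def Claim_equal_traitement_plusieurs_noms : Prop :=
  ∀ (noms : String), Dom_traitement_plusieurs_noms noms →
    Pre_traitement_plusieurs_noms noms →
    Spec_traitement_plusieurs_noms noms (traitement_plusieurs_noms noms)

-- ===== LEMMAS AND PROOFS =====

-- capitalization of a token, as both ports write it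
def pvCap (p : List Char) : List Char :=
  PySem.Chars.upperChar (PySem.List.pyGetD p 0 ' ') :: PySem.List.slice p (some 1) none

def pvKeep (p : List Char) : Bool := p != PySem.Chars.upper p

-- structural version of s.split(",")
def pvSplit : List Char → List (List Char)
  | [] => [[]]
  | c :: rest => if c = ',' then [] :: pvSplit rest else (pvSplit rest).modifyHead (c :: ·)

-- what A's loop + final-segment step produce from the piece list, before the trim
def pvOut : List (List Char) → List Char
  | [] => []
  | p :: ps =>
    if ps.isEmpty then (if pvKeep p then pvCap p else [])
    else (if pvKeep p then pvCap p ++ [',', ' '] else []) ++ pvOut ps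

-- A's scan, reformulated structurally: accumulator, current piece, remaining characters
def pvScan : List Char → List Char → List Char → List Char
  | acc, cur, [] => if pvKeep cur then acc ++ pvCap cur else acc
  | acc, cur, c :: rest =>
    if c = ',' then
      pvScan (if pvKeep cur then acc ++ (pvCap cur ++ [',', ' ']) else acc) [] rest
    else pvScan acc (cur ++ [c]) rest

-- the kept pieces, capitalized (what B joins)
def pvK (ps : List (List Char)) : List (List Char) := (ps.filter (fun p => pvKeep p)).map pvCap

-- the loop body of port A, named for the proofs
def pvBody (cs : List Char) : List Char × Int → Int → List Char × Int :=
  fun st i =>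
    if PySem.List.pyGetD cs i ' ' = ',' then
      let nom := PySem.List.slice cs (some st.2) (some i)
      if nom ≠ PySem.Chars.upper nom then
        (st.1 ++ ((PySem.Chars.upperChar (PySem.List.pyGetD nom 0 ' ') ::
            PySem.List.slice nom (some 1) none) ++ [',', ' ']), i + 1)
      else (st.1, i + 1)
    else st

-- the final-segment step of port A, named for the proofs
def pvFin (cs : List Char) (st : List Char × Int) : List Char :=
  let nom := PySem.List.slice cs (some st.2) none
  if nom ≠ PySem.Chars.upper nom then
    st.1 ++ (PySem.Chars.upperChar (PySem.List.pyGetD nom 0 ' ') ::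
      PySem.List.slice nom (some 1) none)
  else st.1

theorem pvKeep_eq (p : List Char) : (pvKeep p = true) = (p ≠ PySem.Chars.upper p) := by
  simp [pvKeep]

theorem pvModifyHead_modifyHead {α : Type} (l : List α) (f g : α → α) :
    (l.modifyHead g).modifyHead f = l.modifyHead (fun x => f (g x)) := by
  cases l <;> simp

theorem pvGo_spec : ∀ (fuel : Nat) (l cur : List Char) (acc : List (List Char)),
    l.length ≤ fuel →
    PySem.Chars.splitOn.go [','] fuel l cur acc =
      acc.reverse ++ (pvSplit l).modifyHead (cur.reverse ++ ·) := by
  intro fuel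
  induction fuel with
  | zero =>
    intro l cur acc h
    have : l = [] := List.eq_nil_of_length_eq_zero (Nat.le_zero.mp h)
    subst this
    rw [PySem.Chars.splitOn.go]
    simp [pvSplit]
  | succ fuel ih =>
    intro l cur acc h
    cases l with
    | nil =>
      rw [PySem.Chars.splitOn.go]
      simp [pvSplit]
      omega
    | cons c rest =>
      rw [PySem.Chars.splitOn.go]
      by_cases hc : c = ','
      · subst hc
        simp only [List.isPrefixOf, BEq.rfl, Bool.true_and, if_pos, List.length_cons,
          List.length_nil, List.drop_succ_cons, List.drop_zero, Nat.zero_add]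
        rw [ih rest [] (cur.reverse :: acc) (by simpa using Nat.le_of_succ_le_succ h)]
        simp [pvSplit]
        cases pvSplit rest <;> simp
      · simp only [List.isPrefixOf, Bool.and_true]
        rw [if_neg (by simp [Ne.symm hc])]
        rw [ih rest (c :: cur) acc (by simpa using Nat.le_of_succ_le_succ h)]
        simp only [pvSplit, if_neg hc, pvModifyHead_modifyHead]
        have : (fun (x : List Char) => (c :: cur).reverse ++ x) = (fun x => cur.reverse ++ c :: x) := by
          funext x; simp
        rw [this]

theorem pvSplitOn_eq (cs : List Char) : PySem.Chars.splitOn cs [','] = pvSplit cs := by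
  rw [PySem.Chars.splitOn, pvGo_spec (cs.length + 1) cs [] [] (by omega)]
  simp
  cases pvSplit cs <;> simp

theorem pvSplit_ne_nil (cs : List Char) : pvSplit cs ≠ [] := by
  induction cs with
  | nil => simp [pvSplit]
  | cons c rest ih =>
    simp only [pvSplit]
    split
    · simp
    · cases h : pvSplit rest with
      | nil => exact absurd h ih
      | cons a l => simp

theorem pvScan_eq : ∀ (rest acc cur : List Char),
    pvScan acc cur rest = acc ++ pvOut ((pvSplit rest).modifyHead (cur ++ ·)) := by
  intro rest
  induction rest with
  | nil =>
    intro acc cur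
    simp only [pvScan, pvSplit, List.modifyHead, pvOut, List.isEmpty_nil, if_true,
      List.append_nil]
    split <;> simp
  | cons c rest ih =>
    intro acc cur
    by_cases hc : c = ','
    · subst hc
      have e1 : pvScan acc cur (',' :: rest)
          = pvScan (if pvKeep cur = true then acc ++ (pvCap cur ++ [',', ' ']) else acc) [] rest := by
        simp [pvScan]
      rw [e1, ih]
      cases h : pvSplit rest with
      | nil => exact absurd h (pvSplit_ne_nil rest)
      | cons q qs =>
        by_cases hk : pvKeep cur = true <;>
          simp [hk, h, pvSplit, pvOut, List.append_assoc]
    · simp only [pvScan, if_neg hc, ih]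
      simp only [pvSplit, if_neg hc]
      have key : ((pvSplit rest).modifyHead (c :: ·)).modifyHead (cur ++ ·)
          = (pvSplit rest).modifyHead ((cur ++ [c]) ++ ·) := by
        cases pvSplit rest <;> simp
      rw [key]

theorem pvLoop (cs : List Char) : ∀ (d i j : Nat) (acc : List Char), j ≤ i → i + d = cs.length →
    pvFin cs ((PySem.List.pyRange (i : Int) (cs.length : Int) 1).foldl (pvBody cs)
      (acc, (j : Int)))
      = pvScan acc ((cs.drop j).take (i - j)) (cs.drop i) := by
  intro d
  induction d with
  | zero =>
    intro i j acc hji hi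
    have hi' : i = cs.length := by omega
    subst hi'
    rw [PySem.List.pyRange_one_eq_nil (le_refl _)]
    simp only [List.foldl_nil, pvFin]
    rw [PySem.List.slice_from cs (Int.natCast_nonneg j)]
    simp only [Int.toNat_natCast]
    have h2 : List.drop cs.length cs = [] := by simp
    rw [h2]
    simp only [pvScan]
    rw [List.take_of_length_le (by simp)]
    simp only [pvKeep_eq, pvCap]
  | succ d ih =>
    intro i j acc hji hi
    have hilt : i < cs.length := by omega
    rw [PySem.List.pyRange_one_cons (by exact_mod_cast hilt)]
    rw [List.foldl_cons]
    have hget : PySem.List.pyGetD cs (i : Int) ' ' = cs[i] := by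
      rw [PySem.List.pyGetD_natCast]
      exact List.getD_eq_getElem cs ' ' hilt
    have hdrop : cs.drop i = cs[i] :: cs.drop (i + 1) := List.drop_eq_getElem_cons hilt
    have hcast : (i : Int) + 1 = ((i + 1 : Nat) : Int) := by push_cast; ring
    have hseg : PySem.List.slice cs (some (j : Int)) (some (i : Int))
        = (cs.drop j).take (i - j) := PySem.List.slice_natCast cs j i
    by_cases hc : cs[i] = ','
    · have hb : pvBody cs (acc, (j : Int)) (i : Int)
          = ((if pvKeep ((cs.drop j).take (i - j)) then
                acc ++ (pvCap ((cs.drop j).take (i - j)) ++ [',', ' ']) else acc),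
             ((i + 1 : Nat) : Int)) := by
        simp only [pvBody, hget, hseg, hcast]
        rw [if_pos hc]
        split_ifs with h1 h2 h3
        · rfl
        · rw [pvKeep_eq] at h2; exact absurd h1 h2
        · rw [pvKeep_eq] at h3; exact absurd h3 h1
        · rfl
      rw [hb, hcast, ih (i + 1) (i + 1) _ (le_refl _) (by omega)]
      rw [hdrop, hc]
      simp [pvScan]
    · have hb : pvBody cs (acc, (j : Int)) (i : Int) = (acc, (j : Int)) := by
        simp only [pvBody, hget]
        rw [if_neg hc]
      rw [hb, hcast, ih (i + 1) j acc (by omega) (by omega)]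
      rw [hdrop]
      simp only [pvScan, if_neg hc]
      congr 1
      have h3 : i + 1 - j = (i - j) + 1 := by omega
      rw [h3, List.take_add_one]
      congr 1
      rw [List.getElem?_drop]
      have h4 : j + (i - j) = i := by omega
      rw [h4, List.getElem?_eq_getElem hilt]
      rfl

theorem pvK_append_last (ps : List (List Char)) (p : List Char) :
    pvK (ps ++ [p]) = pvK ps ++ (if pvKeep p then [pvCap p] else []) := by
  simp only [pvK, List.filter_append, List.map_append]
  congr 1
  by_cases h : pvKeep p <;> simp [h]

theorem pvK_cons (p : List Char) (ps : List (List Char)) :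
    pvK (p :: ps) = (if pvKeep p then [pvCap p] else []) ++ pvK ps := by
  by_cases h : pvKeep p <;> simp [pvK, h]

theorem pvOut_append_last : ∀ (ps : List (List Char)) (p : List Char),
    pvOut (ps ++ [p]) = PySem.Chars.join [',', ' '] (pvK (ps ++ [p])) ++
      (if pvKeep p = true ∨ pvK ps = [] then [] else [',', ' ']) := by
  intro ps
  induction ps with
  | nil =>
    intro p
    simp only [List.nil_append, pvOut, List.isEmpty_nil, if_true]
    by_cases h : pvKeep p <;>
      simp [h, pvK, PySem.Chars.join_singleton, PySem.Chars.join_nil]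
  | cons q ps ih =>
    intro p
    have hne : ((ps ++ [p]).isEmpty) = false := by simp
    simp only [List.cons_append, pvOut, hne, Bool.false_eq_true, if_false, ih]
    rw [pvK_cons]
    by_cases hq : pvKeep q
    · simp only [hq]
      cases hK : pvK (ps ++ [p]) with
      | nil =>
        have hp : pvKeep p = false := by
          by_cases h : pvKeep p
          · exfalso; rw [pvK_append_last, h] at hK; simp at hK
          · simpa using h
        have hps : pvK ps = [] := by
          rw [pvK_append_last] at hK
          exact (List.append_eq_nil_iff.mp hK).1
        simp [hp, hps, pvK_cons, hq, PySem.Chars.join_singleton, PySem.Chars.join_nil]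
      | cons r rs =>
        have hSame : (if pvKeep p = true ∨ pvK ps = [] then ([] : List Char) else [',', ' '])
            = (if pvKeep p = true ∨ pvK (q :: ps) = [] then ([] : List Char) else [',', ' ']) := by
          by_cases hp : pvKeep p
          · simp [hp]
          · have hps : pvK ps ≠ [] := by
              intro h0
              rw [pvK_append_last, h0] at hK
              simp [hp] at hK
            have hqs : pvK (q :: ps) ≠ [] := by rw [pvK_cons, hq]; simp
            simp [hp, hps, hqs]
        rw [hSame]
        simp only [if_true, List.singleton_append, PySem.Chars.join_cons_cons,
          List.append_assoc]
    · simp only [hq, Bool.false_eq_true, if_false, List.nil_append]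
      congr 2
      have : pvK (q :: ps) = pvK ps := by rw [pvK_cons]; simp [hq]
      rw [this]

theorem pvSplit_no_comma : ∀ (cs : List Char), ∀ p ∈ pvSplit cs, ',' ∉ p := by
  intro cs
  induction cs with
  | nil => intro p hp; simp [pvSplit] at hp; simp [hp]
  | cons c rest ih =>
    intro p hp
    simp only [pvSplit] at hp
    split at hp
    · rcases List.mem_cons.mp hp with h | h
      · simp [h]
      · exact ih p h
    · cases h : pvSplit rest with
      | nil => rw [h] at hp; simp at hp
      | cons q qs =>
        rw [h] at hp
        simp only [List.modifyHead, List.mem_cons] at hp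
        rcases hp with h1 | h1
        · subst h1
          intro hmem
          rcases List.mem_cons.mp hmem with h2 | h2
          · exact ‹¬ c = ','› h2.symm
          · exact ih q (by rw [h]; exact List.mem_cons_self ..) h2
        · exact ih p (by rw [h]; exact List.mem_cons_of_mem _ h1)

theorem pvUpperChar_ne_comma (c : Char) (h : c ≠ ',') : PySem.Chars.upperChar c ≠ ',' := by
  unfold PySem.Chars.upperChar PySem.Chars.islower
  split
  · rename_i hl
    simp only [Bool.and_eq_true, decide_eq_true_eq] at hl
    intro hc
    have h1 : ('a' : Char) ≤ c := hl.1
    have h2 : c ≤ ('z' : Char) := hl.2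
    rw [Char.le_def] at h1 h2
    have hv1 : 97 ≤ c.toNat := UInt32.le_iff_toNat_le.mp h1
    have hv2 : c.toNat ≤ 122 := UInt32.le_iff_toNat_le.mp h2
    have he : (Char.ofNat (c.toNat - 32)).toNat = c.toNat - 32 := by
      rw [Char.toNat_ofNat, if_pos (Or.inl (by omega))]
    rw [hc] at he
    have : (',' : Char).toNat = 44 := rfl
    omega
  · exact h

theorem pvCap_no_comma (p : List Char) (h : ',' ∉ p) : ',' ∉ pvCap p := by
  simp only [pvCap, List.mem_cons]
  intro hm
  rcases hm with h1 | h1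
  · have hc : PySem.List.pyGetD p 0 ' ' ≠ ',' := by
      rw [PySem.List.pyGetD_zero]
      cases p with
      | nil => simp
      | cons a l =>
        simp only [List.getD_cons_zero]
        intro ha
        exact h (by simp [ha])
    exact pvUpperChar_ne_comma _ hc h1.symm
  · exact h (PySem.List.mem_of_mem_slice p _ _ h1)

theorem pvGet2_ne (q : List Char) (h : ',' ∉ q) : PySem.List.pyGet? q (-2) ≠ some ',' := by
  by_cases hl : 2 ≤ q.length
  · rw [PySem.List.pyGet?_neg_ofNat q 2 (by omega) hl]
    intro hc
    exact h (List.mem_of_getElem? hc)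
  · rw [(PySem.List.pyGet?_eq_none_iff q (-2)).mpr]
    · simp
    · simp [PySem.Raise.InRange]
      omega

theorem pvJoin_ne_nil (r : List Char) (K : List (List Char)) (h : r ≠ []) :
    PySem.Chars.join [',', ' '] (r :: K) ≠ [] := by
  cases K with
  | nil => rw [PySem.Chars.join_singleton]; exact h
  | cons s K => rw [PySem.Chars.join_cons_cons]; simp

theorem pvJoin_no_trim : ∀ (K : List (List Char)), (∀ q ∈ K, q ≠ [] ∧ ',' ∉ q) →
    PySem.List.pyGet? (PySem.Chars.join [',', ' '] K) (-2) ≠ some ',' := by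
  intro K
  induction K with
  | nil => intro _; decide
  | cons q K ih =>
    intro hq
    cases K with
    | nil =>
      rw [PySem.Chars.join_singleton]
      exact pvGet2_ne q (hq q (by simp)).2
    | cons r K' =>
      rw [PySem.Chars.join_cons_cons]
      have hT := pvJoin_ne_nil r K' (hq r (by simp)).1
      set T := PySem.Chars.join [',', ' '] (r :: K') with hTdef
      have hTlen : 1 ≤ T.length := by
        cases h : T with
        | nil => exact absurd h hT
        | cons a l => simp [h]
      have hlen : (q ++ [',', ' '] ++ T).length = q.length + 2 + T.length := by simp; omega
      rw [PySem.List.pyGet?_neg_ofNat _ 2 (by omega) (by omega)]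
      by_cases h2 : 2 ≤ T.length
      · rw [hlen]
        have : q.length + 2 + T.length - 2 = (q ++ [',', ' ']).length + (T.length - 2) := by
          simp; omega
        rw [this, List.getElem?_append_right (by simp)]
        have : (q ++ [',', ' ']).length + (T.length - 2) - (q ++ [',', ' ']).length
            = T.length - 2 := by omega
        rw [this]
        have hih := ih (fun s hs => hq s (List.mem_cons_of_mem _ hs))
        rw [PySem.List.pyGet?_neg_ofNat _ 2 (by omega) (by omega)] at hih
        exact hih
      · have hT1 : T.length = 1 := by omega
        rw [hlen, hT1]
        have h5 : q.length + 2 + 1 - 2 = q.length + 1 := by omega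
        rw [h5]
        rw [show q ++ [',', ' '] ++ T = q ++ ([',', ' '] ++ T) by simp]
        rw [List.getElem?_append_right (by omega)]
        have h6 : q.length + 1 - q.length = 1 := by omega
        rw [h6]
        simp

theorem pvK_elems (cs : List Char) : ∀ q ∈ pvK (pvSplit cs), q ≠ [] ∧ ',' ∉ q := by
  intro q hq
  simp only [pvK, List.mem_map, List.mem_filter] at hq
  obtain ⟨p, ⟨hp, _⟩, rfl⟩ := hq
  exact ⟨by simp [pvCap], pvCap_no_comma p (pvSplit_no_comma cs p hp)⟩

theorem pvResult (cs : List Char) :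
    (if 0 < (pvOut (pvSplit cs)).length ∧
        PySem.List.pyGet? (pvOut (pvSplit cs)) (-2) = some ','
     then PySem.List.slice (pvOut (pvSplit cs)) (some 0) (some (-2))
     else pvOut (pvSplit cs))
    = PySem.Chars.join [',', ' '] (pvK (pvSplit cs)) := by
  have hmemK := pvK_elems cs
  rcases List.eq_nil_or_concat (pvSplit cs) with h0 | ⟨qs, p, hps⟩
  · exact absurd h0 (pvSplit_ne_nil cs)
  · rw [List.concat_eq_append] at hps
    rw [hps] at hmemK ⊢
    rw [pvOut_append_last]
    by_cases hsuf : pvKeep p = true ∨ pvK qs = []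
    · rw [if_pos hsuf, List.append_nil]
      have hno := pvJoin_no_trim (pvK (qs ++ [p])) hmemK
      rw [if_neg (by intro hcon; exact hno hcon.2)]
    · rw [if_neg hsuf]
      have hlen : (PySem.Chars.join [',', ' '] (pvK (qs ++ [p])) ++ [',', ' ']).length
          = (PySem.Chars.join [',', ' '] (pvK (qs ++ [p]))).length + 2 := by simp
      have hget : PySem.List.pyGet?
          (PySem.Chars.join [',', ' '] (pvK (qs ++ [p])) ++ [',', ' ']) (-2) = some ',' := by
        rw [PySem.List.pyGet?_neg_ofNat _ 2 (by omega) (by omega), hlen]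
        have h7 : (PySem.Chars.join [',', ' '] (pvK (qs ++ [p]))).length + 2 - 2
            = (PySem.Chars.join [',', ' '] (pvK (qs ++ [p]))).length := by omega
        rw [h7, List.getElem?_append_right (le_refl _), Nat.sub_self]
        rfl
      rw [if_pos ⟨by simp, hget⟩]
      have hz : PySem.List.slice
          (PySem.Chars.join [',', ' '] (pvK (qs ++ [p])) ++ [',', ' ']) (some 0) (some (-2))
          = PySem.List.slice
          (PySem.Chars.join [',', ' '] (pvK (qs ++ [p])) ++ [',', ' ']) none (some (-2)) := by
        simp
      rw [hz, PySem.List.slice_to_neg_ofNat _ 2 (by omega), hlen]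
      have h8 : (PySem.Chars.join [',', ' '] (pvK (qs ++ [p]))).length + 2 - 2
          = (PySem.Chars.join [',', ' '] (pvK (qs ++ [p]))).length := by omega
      rw [h8, List.take_left]

-- ===== VERDICT (by name: the statement is the Claim_ definition above) =====
theorem traitement_plusieurs_noms_spec : Claim_equal_traitement_plusieurs_noms := by
  intro noms _ _
  unfold Spec_traitement_plusieurs_noms
  have hA : traitement_plusieurs_noms noms = String.ofList
      (if 0 < (pvFin noms.toList ((PySem.List.pyRange 0 (noms.toList.length : Int) 1).foldl
            (pvBody noms.toList) ([], 0))).length ∧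
          PySem.List.pyGet? (pvFin noms.toList ((PySem.List.pyRange 0 (noms.toList.length : Int) 1).foldl
            (pvBody noms.toList) ([], 0))) (-2) = some ','
       then PySem.List.slice (pvFin noms.toList ((PySem.List.pyRange 0 (noms.toList.length : Int) 1).foldl
            (pvBody noms.toList) ([], 0))) (some 0) (some (-2))
       else pvFin noms.toList ((PySem.List.pyRange 0 (noms.toList.length : Int) 1).foldl
            (pvBody noms.toList) ([], 0))) := rfl
  have hB : traitement_plusieurs_noms_alt noms = String.ofList
      (PySem.Chars.join [',', ' '] (pvK (PySem.Chars.splitOn noms.toList [',']))) := rfl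
  rw [hA, hB, pvSplitOn_eq]
  have hloop := pvLoop noms.toList noms.toList.length 0 0 [] (le_refl 0) (by omega)
  simp only [Nat.cast_zero, Nat.sub_zero, List.drop_zero, List.take_zero] at hloop
  rw [show ((noms.toList.length : Int)) = ((noms.toList.length : Nat) : Int) from rfl] at hloop ⊢
  rw [hloop]
  rw [pvScan_eq]
  have hmh : (pvSplit noms.toList).modifyHead (fun x => [] ++ x) = pvSplit noms.toList := by
    cases pvSplit noms.toList <;> simp
  rw [hmh, List.nil_append]
  rw [pvResult]
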